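-- pv_equiv track=rewrite | github.com/ldgonzalezvazquez/TD | RecSim/RecSimulator_v2.py | best_matches
-- ===== SOURCE A (Python) =====
-- def best_matches(santa_dict: dict[str, set[str]],
--                  tool_dict : dict[str, set[str]],
--                  nd_val: str = "ND") -> dict[str, str]:
--     """
--     Assigns each Santa group to the external group with greatest intersection,
--     using each external group **at most once**.
--     If there aren't enough external groups, leftover Santa groups are marked with `nd_val`.
--     """
--     remaining_t = set(tool_dict)              # "free" external groups
--     remaining_s = set(santa_dict)             # P1, P2, REC to assign
--     match      : dict[str,str] = {}
--
--     # build all possible intersections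
--     candidates = []
--     for s_name, s_set in santa_dict.items():
--         for t_name, t_set in tool_dict.items():
--             candidates.append((len(s_set & t_set), s_name, t_name))
--
--     # greedy: largest intersection first
--     for _, s_name, t_name in sorted(candidates, reverse=True):
--         if s_name in remaining_s and t_name in remaining_t:
--             match[s_name] = t_name
--             remaining_s.remove(s_name)
--             remaining_t.remove(t_name)
--
--     # what remains unassigned → ND
--     for s_name in remaining_s:
--         match[s_name] = nd_val
--
--     return match
-- ===== SOURCE B (Python) =====
-- def best_matches(santa_dict: dict[str, set[str]],
--                  tool_dict: dict[str, set[str]],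
--                  nd_val: str = "ND") -> dict[str, str]:
--     """Greedy max-intersection matching by repeated max-selection instead of
--     building and sorting the whole candidate list once."""
--     match: dict[str, str] = {}
--     remaining_s = list(santa_dict)
--     remaining_t = list(tool_dict)
--     while remaining_s and remaining_t:
--         _, s_name, t_name = max((len(santa_dict[s] & tool_dict[t]), s, t)
--                                 for s in remaining_s for t in remaining_t)
--         match[s_name] = t_name
--         remaining_s.remove(s_name)
--         remaining_t.remove(t_name)
--     for s_name in remaining_s:
--         match[s_name] = nd_val
--     return match
-- ===== Notes on version B (the rewrite author's own statement) =====
-- stated objective: alternative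
-- what changed: Instead of building every (score, santa, tool) candidate, sorting the whole list in descending order once and scanning it, B keeps the two remaining key lists and repeatedly selects the lexicographically maximal (score, s_name, t_name) pair over the still-free keys, assigning it and shrinking both lists until one is empty.
import Mathlib
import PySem

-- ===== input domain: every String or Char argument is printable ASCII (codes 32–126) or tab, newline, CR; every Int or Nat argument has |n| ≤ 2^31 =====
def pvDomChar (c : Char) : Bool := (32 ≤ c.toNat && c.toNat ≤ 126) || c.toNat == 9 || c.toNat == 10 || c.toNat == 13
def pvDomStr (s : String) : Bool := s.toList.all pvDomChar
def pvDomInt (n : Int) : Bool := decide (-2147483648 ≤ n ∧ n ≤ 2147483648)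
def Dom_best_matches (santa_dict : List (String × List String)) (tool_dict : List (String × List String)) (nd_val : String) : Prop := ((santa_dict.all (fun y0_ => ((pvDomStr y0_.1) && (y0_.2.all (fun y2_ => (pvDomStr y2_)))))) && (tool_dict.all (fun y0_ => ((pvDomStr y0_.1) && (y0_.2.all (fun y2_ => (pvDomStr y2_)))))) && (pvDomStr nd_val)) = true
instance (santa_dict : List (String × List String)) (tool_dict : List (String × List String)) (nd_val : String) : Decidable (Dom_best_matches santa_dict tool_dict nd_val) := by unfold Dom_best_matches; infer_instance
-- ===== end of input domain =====

-- B changes the strategy, not the result: instead of building and reverse-sorting all candidates once,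
-- it repeatedly selects the lexicographically maximal (score, s_name, t_name) pair over the still-free keys.
-- Equivalence is about the RETURN value; both the Python A and B return a fresh dict (no argument is mutated).

-- ===== PORT A =====
-- Python compares the tuples (score, s_name, t_name) lexicographically, strings by code points:
-- this key into a lexicographic product order is exactly that comparison (List Char keeps it kernel-reducible).
def bmKey (c : Nat × String × String) : Lex (Nat × Lex (List Char × List Char)) :=
  toLex (c.1, toLex (c.2.1.toList, c.2.2.toList))

-- the body of A's greedy 'for … in sorted(candidates, reverse=True)' loop; remaining_s.remove(s_name) cannot
-- raise here (membership was just tested), so Set.discard is exact for Python's set.remove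
def bmStepA (st : PySem.Dict String String × PySem.Set String × PySem.Set String)
    (c : Nat × String × String) : PySem.Dict String String × PySem.Set String × PySem.Set String :=
  if PySem.Set.contains st.2.1 c.2.1 && PySem.Set.contains st.2.2 c.2.2 then
    (st.1.insert c.2.1 c.2.2, PySem.Set.discard st.2.1 c.2.1, PySem.Set.discard st.2.2 c.2.2)
  else st

def best_matches (santa_dict : List (String × List String)) (tool_dict : List (String × List String)) (nd_val : String) : List (String × String) :=
  let remaining_t : PySem.Set String := PySem.Set.ofList (tool_dict.map Prod.fst)
  let remaining_s : PySem.Set String := PySem.Set.ofList (santa_dict.map Prod.fst)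
  let candidates : List (Nat × String × String) :=
    santa_dict.foldl (fun acc p =>
      tool_dict.foldl (fun acc q =>
        acc ++ [((PySem.Set.inter p.2 q.2).length, p.1, q.1)]) acc) []
  let fin := (PySem.List.sorted candidates bmKey true).foldl bmStepA
      (PySem.Dict.empty, remaining_s, remaining_t)
  (fin.2.1.foldl (fun d s => d.insert s nd_val) fin.1).items

-- ===== PORT B =====
-- len(santa_dict[s] & tool_dict[t]) via the dict lookups B performs
def bmScore (santa_dict tool_dict : List (String × List String)) (s t : String) : Nat :=
  (PySem.Set.inter ((PySem.Dict.mk santa_dict).getD s []) ((PySem.Dict.mk tool_dict).getD t [])).length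

-- B's 'while remaining_s and remaining_t' loop; each pass removes one element of rs, so rs.length is enough fuel;
-- list.remove is List.erase here (the removed element is a member, so no ValueError)
def bmGo (santa_dict tool_dict : List (String × List String)) (fuel : Nat)
    (d : PySem.Dict String String) (rs rt : List String) :
    PySem.Dict String String × List String :=
  match fuel with
  | 0 => (d, rs)
  | Nat.succ f =>
    if rs.isEmpty || rt.isEmpty then (d, rs)
    else
      match PySem.List.max? (rs.flatMap (fun s => rt.map (fun t => (bmScore santa_dict tool_dict s t, s, t)))) bmKey with
      | none => (d, rs)   -- unreachable: rs and rt are non-empty, so the candidate list is non-empty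
      | some c => bmGo santa_dict tool_dict f (d.insert c.2.1 c.2.2) (rs.erase c.2.1) (rt.erase c.2.2)

def best_matches_alt (santa_dict : List (String × List String)) (tool_dict : List (String × List String)) (nd_val : String) : List (String × String) :=
  let rs : List String := santa_dict.map Prod.fst
  let rt : List String := tool_dict.map Prod.fst
  let fin := bmGo santa_dict tool_dict rs.length PySem.Dict.empty rs rt
  (fin.2.foldl (fun d s => d.insert s nd_val) fin.1).items

-- ===== PRECONDITION & SPEC =====
-- the arguments are Python dicts whose values are Python sets: keys occur once and each value list is duplicate-free
def Pre_best_matches (santa_dict : List (String × List String)) (tool_dict : List (String × List String)) (nd_val : String) : Prop :=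
  (santa_dict.map Prod.fst).Nodup ∧ (tool_dict.map Prod.fst).Nodup ∧
  (∀ p ∈ santa_dict, p.2.Nodup) ∧ (∀ p ∈ tool_dict, p.2.Nodup)
instance (santa_dict : List (String × List String)) (tool_dict : List (String × List String)) (nd_val : String) : Decidable (Pre_best_matches santa_dict tool_dict nd_val) := by unfold Pre_best_matches; infer_instance

def pvWitness_best_matches : (List (String × List String)) × (List (String × List String)) × String :=
  ([("P1", ["a", "b"]), ("P2", ["c"])], [("T1", ["b"]), ("T2", ["c", "d"])], "ND")

def Spec_best_matches (santa_dict : List (String × List String)) (tool_dict : List (String × List String)) (nd_val : String) (out : List (String × String)) : Prop := out = best_matches_alt santa_dict tool_dict nd_val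
instance (santa_dict : List (String × List String)) (tool_dict : List (String × List String)) (nd_val : String) (out : List (String × String)) : Decidable (Spec_best_matches santa_dict tool_dict nd_val out) := by unfold Spec_best_matches; infer_instance

-- ===== CLAIM (what is proved, stated in full; the proofs are below) =====
def Claim_equal_best_matches : Prop := ∀ (santa_dict : List (String × List String)) (tool_dict : List (String × List String)) (nd_val : String), Dom_best_matches santa_dict tool_dict nd_val → Pre_best_matches santa_dict tool_dict nd_val → Spec_best_matches santa_dict tool_dict nd_val (best_matches santa_dict tool_dict nd_val)

-- ===== LEMMAS AND PROOFS =====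

theorem bmKey_injective : Function.Injective bmKey := by
  intro a b h
  unfold bmKey at h
  have h' := toLex.injective h
  obtain ⟨h1, h2⟩ := Prod.mk.injEq .. ▸ h'
  have h2' := toLex.injective h2
  obtain ⟨h3, h4⟩ := Prod.mk.injEq .. ▸ h2'
  exact Prod.ext h1 (Prod.ext (String.toList_injective h3) (String.toList_injective h4))

-- the core invariant: folding A's step over a descending-sorted list that contains every
-- candidate of the still-free keys computes exactly B's repeated-max loop
theorem bm_main (santa_dict tool_dict : List (String × List String)) :
    ∀ (L : List (Nat × String × String)) (fuel : Nat) (d : PySem.Dict String String)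
      (rs rt : List String),
    rs.Nodup → rt.Nodup → rs.length ≤ fuel →
    L.Pairwise (fun a b => bmKey b ≤ bmKey a) →
    (∀ c ∈ L, c.1 = bmScore santa_dict tool_dict c.2.1 c.2.2) →
    (∀ s ∈ rs, ∀ t ∈ rt, (bmScore santa_dict tool_dict s t, s, t) ∈ L) →
    ((L.foldl bmStepA (d, rs, rt)).1, (L.foldl bmStepA (d, rs, rt)).2.1)
      = bmGo santa_dict tool_dict fuel d rs rt := by
  intro L
  induction L with
  | nil =>
    intro fuel d rs rt _ _ _ _ _ hcov
    have hempty : rs = [] ∨ rt = [] := by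
      by_contra h
      push_neg at h
      obtain ⟨s, hs⟩ := List.exists_mem_of_ne_nil rs h.1
      obtain ⟨t, ht⟩ := List.exists_mem_of_ne_nil rt h.2
      exact (List.not_mem_nil) (hcov s hs t ht)
    cases fuel with
    | zero => simp [bmGo]
    | succ f =>
      have hb : rs.isEmpty || rt.isEmpty := by
        rcases hempty with h | h <;> simp [h]
      simp [bmGo, hb]
  | cons c L ih =>
    intro fuel d rs rt hnds hndt hfuel hpw hsc hcov
    have hpw' := List.pairwise_cons.mp hpw
    by_cases hval : c.2.1 ∈ rs ∧ c.2.2 ∈ rt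
    · -- c is the best still-available candidate: both sides take it
      obtain ⟨hs, ht⟩ := hval
      have hc_eq : c = (bmScore santa_dict tool_dict c.2.1 c.2.2, c.2.1, c.2.2) :=
        Prod.ext (hsc c List.mem_cons_self) rfl
      cases fuel with
      | zero =>
        have := List.length_pos_of_mem hs
        omega
      | succ f =>
        have hrs : rs ≠ [] := List.ne_nil_of_mem hs
        have hrt : rt ≠ [] := List.ne_nil_of_mem ht
        set cands := rs.flatMap (fun s => rt.map (fun t => (bmScore santa_dict tool_dict s t, s, t))) with hcands
        have hc_mem : c ∈ cands := by
          rw [hc_eq, hcands]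
          exact List.mem_flatMap.mpr ⟨c.2.1, hs, List.mem_map.mpr ⟨c.2.2, ht, rfl⟩⟩
        have hdom : ∀ y ∈ cands, bmKey y ≤ bmKey c := by
          intro y hy
          rw [hcands] at hy
          obtain ⟨s, hs', hy'⟩ := List.mem_flatMap.mp hy
          obtain ⟨t, ht', rfl⟩ := List.mem_map.mp hy'
          rcases List.mem_cons.mp (hcov s hs' t ht') with h | h
          · rw [h]
          · exact hpw'.1 _ h
        have hmax : PySem.List.max? cands bmKey = some c := by
          cases hm : PySem.List.max? cands bmKey with
          | none =>
            rw [PySem.List.max?_eq_none_iff] at hm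
            rw [hm] at hc_mem
            exact absurd hc_mem List.not_mem_nil
          | some m =>
            have h1 : bmKey c ≤ bmKey m := PySem.List.max?_isMax hm c hc_mem
            have h2 : bmKey m ≤ bmKey c := hdom m (PySem.List.max?_mem hm)
            rw [bmKey_injective (le_antisymm h2 h1)]
        have hstep : bmStepA (d, rs, rt) c
            = (d.insert c.2.1 c.2.2, PySem.Set.discard rs c.2.1, PySem.Set.discard rt c.2.2) := by
          unfold bmStepA
          simp [PySem.Set.contains_iff, hs, ht]
        have hde_s : PySem.Set.discard rs c.2.1 = rs.erase c.2.1 := by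
          rw [List.Nodup.erase_eq_filter hnds]
          unfold PySem.Set.discard
          congr 1
        have hde_t : PySem.Set.discard rt c.2.2 = rt.erase c.2.2 := by
          rw [List.Nodup.erase_eq_filter hndt]
          unfold PySem.Set.discard
          congr 1
        have hgo : bmGo santa_dict tool_dict (f + 1) d rs rt
            = bmGo santa_dict tool_dict f (d.insert c.2.1 c.2.2) (rs.erase c.2.1) (rt.erase c.2.2) := by
          rw [bmGo]
          rw [← hcands, hmax]
          simp [List.isEmpty_iff, hrs, hrt]
        rw [hgo, List.foldl_cons, hstep, hde_s, hde_t]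
        refine ih f (d.insert c.2.1 c.2.2) (rs.erase c.2.1) (rt.erase c.2.2)
          (hnds.erase _) (hndt.erase _) ?_ hpw'.2
          (fun x hx => hsc x (List.mem_cons_of_mem _ hx)) ?_
        · have := List.length_erase_of_mem hs
          omega
        · intro s hs' t ht'
          obtain ⟨hsne, hsmem⟩ := (List.Nodup.mem_erase_iff hnds).mp hs'
          obtain ⟨htne, htmem⟩ := (List.Nodup.mem_erase_iff hndt).mp ht'
          rcases List.mem_cons.mp (hcov s hsmem t htmem) with h | h
          · exfalso
            apply hsne
            rw [← h]
          · exact h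
    · -- c is no longer available: A skips it, B's state is unchanged
      have hstep : bmStepA (d, rs, rt) c = (d, rs, rt) := by
        have hb : (PySem.Set.contains rs c.2.1 && PySem.Set.contains rt c.2.2) = false := by
          rcases Bool.eq_false_or_eq_true (PySem.Set.contains rs c.2.1 && PySem.Set.contains rt c.2.2) with hb | hb
          · rw [Bool.and_eq_true, PySem.Set.contains_iff, PySem.Set.contains_iff] at hb
            exact absurd hb hval
          · exact hb
        unfold bmStepA
        rw [hb]
        simp
      rw [List.foldl_cons, hstep]
      exact ih fuel d rs rt hnds hndt hfuel hpw'.2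
        (fun x hx => hsc x (List.mem_cons_of_mem _ hx))
        (fun s hs t ht => by
          rcases List.mem_cons.mp (hcov s hs t ht) with h | h
          · exfalso
            apply hval
            rw [← h]
            exact ⟨hs, ht⟩
          · exact h)

-- ===== VERDICT (by name: the statement is the Claim_ definition above) =====
theorem best_matches_spec : Claim_equal_best_matches := by
  intro santa_dict tool_dict nd_val _ hpre
  obtain ⟨hks, hkt, _, _⟩ := hpre
  unfold Spec_best_matches best_matches best_matches_alt
  have hofS : PySem.Set.ofList (santa_dict.map Prod.fst) = santa_dict.map Prod.fst :=
    PySem.Set.ofList_eq_self_of_nodup _ hks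
  have hofT : PySem.Set.ofList (tool_dict.map Prod.fst) = tool_dict.map Prod.fst :=
    PySem.Set.ofList_eq_self_of_nodup _ hkt
  have hcand : santa_dict.foldl (fun acc p =>
        tool_dict.foldl (fun acc q =>
          acc ++ [((PySem.Set.inter p.2 q.2).length, p.1, q.1)]) acc) ([] : List (Nat × String × String))
      = santa_dict.flatMap (fun p => tool_dict.map (fun q => ((PySem.Set.inter p.2 q.2).length, p.1, q.1))) := by
    have h1 : santa_dict.foldl (fun acc p =>
          tool_dict.foldl (fun acc q =>
            acc ++ [((PySem.Set.inter p.2 q.2).length, p.1, q.1)]) acc) ([] : List (Nat × String × String))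
        = santa_dict.foldl (fun acc (p : String × List String) =>
            acc ++ tool_dict.map (fun q => ((PySem.Set.inter p.2 q.2).length, p.1, q.1))) [] :=
      PySem.List.foldl_congr_mem _ _ _ _ (fun acc p _ => PySem.List.foldl_append_singleton_eq_map _ _ _)
    rw [h1, PySem.List.foldl_append_eq_flatMap]
    rfl
  have hgetS : ∀ p ∈ santa_dict, (PySem.Dict.mk santa_dict).getD p.1 [] = p.2 := by
    intro p hp
    apply PySem.Dict.getD_of_mem_items
    · show (p.1, p.2) ∈ santa_dict
      simpa using hp
    · simpa [PySem.Dict.keys] using hks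
  have hgetT : ∀ q ∈ tool_dict, (PySem.Dict.mk tool_dict).getD q.1 [] = q.2 := by
    intro q hq
    apply PySem.Dict.getD_of_mem_items
    · show (q.1, q.2) ∈ tool_dict
      simpa using hq
    · simpa [PySem.Dict.keys] using hkt
  have hscore : ∀ p ∈ santa_dict, ∀ q ∈ tool_dict,
      bmScore santa_dict tool_dict p.1 q.1 = (PySem.Set.inter p.2 q.2).length := by
    intro p hp q hq
    unfold bmScore
    rw [hgetS p hp, hgetT q hq]
  set cands := santa_dict.flatMap
      (fun p => tool_dict.map (fun q => ((PySem.Set.inter p.2 q.2).length, p.1, q.1))) with hcands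
  have hscL : ∀ c ∈ PySem.List.sorted cands bmKey true,
      c.1 = bmScore santa_dict tool_dict c.2.1 c.2.2 := by
    intro c hc
    have hc' : c ∈ cands := (PySem.List.sorted_perm cands bmKey true).mem_iff.mp hc
    rw [hcands] at hc'
    obtain ⟨p, hp, hc''⟩ := List.mem_flatMap.mp hc'
    obtain ⟨q, hq, rfl⟩ := List.mem_map.mp hc''
    exact (hscore p hp q hq).symm
  have hcovL : ∀ s ∈ santa_dict.map Prod.fst, ∀ t ∈ tool_dict.map Prod.fst,
      (bmScore santa_dict tool_dict s t, s, t) ∈ PySem.List.sorted cands bmKey true := by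
    intro s hsm t htm
    obtain ⟨p, hp, rfl⟩ := List.mem_map.mp hsm
    obtain ⟨q, hq, rfl⟩ := List.mem_map.mp htm
    apply (PySem.List.sorted_perm cands bmKey true).mem_iff.mpr
    rw [hscore p hp q hq, hcands]
    exact List.mem_flatMap.mpr ⟨p, hp, List.mem_map.mpr ⟨q, hq, rfl⟩⟩
  have hmain := bm_main santa_dict tool_dict (PySem.List.sorted cands bmKey true)
    (santa_dict.map Prod.fst).length PySem.Dict.empty
    (santa_dict.map Prod.fst) (tool_dict.map Prod.fst)
    (hks) (hkt) (le_refl _)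
    (PySem.List.sorted_pairwise_rev cands bmKey) hscL hcovL
  simp only [hofS, hofT, hcand]
  have h1 : (List.foldl bmStepA (PySem.Dict.empty, santa_dict.map Prod.fst, tool_dict.map Prod.fst)
        (PySem.List.sorted cands bmKey true)).1
      = (bmGo santa_dict tool_dict (santa_dict.map Prod.fst).length PySem.Dict.empty
          (santa_dict.map Prod.fst) (tool_dict.map Prod.fst)).1 := congrArg Prod.fst hmain
  have h2 : (List.foldl bmStepA (PySem.Dict.empty, santa_dict.map Prod.fst, tool_dict.map Prod.fst)
        (PySem.List.sorted cands bmKey true)).2.1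
      = (bmGo santa_dict tool_dict (santa_dict.map Prod.fst).length PySem.Dict.empty
          (santa_dict.map Prod.fst) (tool_dict.map Prod.fst)).2 := congrArg Prod.snd hmain
  rw [h1, h2]
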